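-- pv_equiv track=rewrite | github.com/echocall/STAT | handlers/assethandler.py | asset_sorter
-- ===== SOURCE A (Python) =====
-- def asset_sorter(assets_to_sort: dict, sort_by_list: list, sort_field: str) -> dict:
--         #sorted_assets = {'category':[<asset1>,<asset2>]}
--         sorted_assets = {}
--
--         # initialize the dictionary of lists by field
--         for each in sort_by_list:
--             sorted_assets[each] = []
--         for key in assets_to_sort:
--         # if the asset's category is in the sorted dictionary, add it.
--             if assets_to_sort[key][sort_field] in sorted_assets:
--                 # get the field we're sorting into
--                 sort_field_name = assets_to_sort[key][sort_field]
--                 # get the asset and add it to the dictionary for that field.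
--                 sorted_assets[sort_field_name].append(assets_to_sort[key])
--         return sorted_assets
-- ===== SOURCE B (Python) =====
-- def asset_sorter(assets_to_sort: dict, sort_by_list: list, sort_field: str) -> dict:
--     # Per-category scan: for each listed category, filter the assets whose
--     # field equals it. Nested scans instead of A's single hash-bucketing pass.
--     assets = list(assets_to_sort.values())
--     return {cat: [a for a in assets if a[sort_field] == cat] for cat in sort_by_list}
-- ===== Notes on version B (the rewrite author's own statement) =====
-- stated objective: simpler
-- what changed: B loops over the categories and filters the asset list per category (nested-scan comprehension), instead of A's single pass over assets appending into pre-initialized buckets via a dict-membership test.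
import Mathlib
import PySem

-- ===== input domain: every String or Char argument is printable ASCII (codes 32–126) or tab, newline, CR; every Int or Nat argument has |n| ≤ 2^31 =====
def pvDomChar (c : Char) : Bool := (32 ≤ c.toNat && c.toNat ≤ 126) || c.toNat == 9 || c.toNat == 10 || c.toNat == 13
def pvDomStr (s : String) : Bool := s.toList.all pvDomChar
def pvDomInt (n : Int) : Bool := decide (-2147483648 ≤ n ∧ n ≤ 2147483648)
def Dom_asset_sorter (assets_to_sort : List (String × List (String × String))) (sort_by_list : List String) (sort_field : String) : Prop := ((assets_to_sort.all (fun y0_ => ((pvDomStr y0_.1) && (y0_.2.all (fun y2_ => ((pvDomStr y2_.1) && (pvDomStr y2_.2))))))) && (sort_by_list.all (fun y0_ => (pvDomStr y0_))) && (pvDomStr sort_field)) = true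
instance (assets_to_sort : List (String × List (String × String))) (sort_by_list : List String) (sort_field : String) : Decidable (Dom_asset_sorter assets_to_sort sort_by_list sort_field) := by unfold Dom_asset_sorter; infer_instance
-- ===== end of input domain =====

-- B loops over the categories and filters the asset list per category (nested-scan
-- comprehension) instead of A's single bucketing pass; simpler, not faster.


-- ===== PORT A =====
def asset_sorter (assets_to_sort : List (String × List (String × String))) (sort_by_list : List String) (sort_field : String) : List (String × List (List (String × String))) :=
  -- sorted_assets = {}; for each in sort_by_list: sorted_assets[each] = []
  let init : PySem.Dict String (List (List (String × String))) :=
    sort_by_list.foldl (fun d each => d.insert each []) PySem.Dict.empty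
  -- for key in assets_to_sort: if assets_to_sort[key][sort_field] in sorted_assets: append
  let final : PySem.Dict String (List (List (String × String))) :=
    assets_to_sort.foldl (fun d kv =>
      -- assets_to_sort[key][sort_field] raises KeyError when the field is absent
      -- (excluded by Pre_); ported as getD with "" there
      let v := (PySem.Dict.mk kv.2).getD sort_field ""
      if d.contains v then
        -- sorted_assets[v].append(asset); key v is present, so modify with default [] is exact
        d.modify v [] (fun l => l ++ [kv.2])
      else d) init
  final.items

-- ===== PORT B =====
def asset_sorter_alt (assets_to_sort : List (String × List (String × String))) (sort_by_list : List String) (sort_field : String) : List (String × List (List (String × String))) :=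
  -- assets = list(assets_to_sort.values())
  let assets := assets_to_sort.map (·.2)
  -- {cat: [a for a in assets if a[sort_field] == cat] for cat in sort_by_list}
  (sort_by_list.foldl (fun r cat =>
      r.insert cat (assets.filter (fun a => (PySem.Dict.mk a).getD sort_field "" == cat)))
    PySem.Dict.empty).items

-- ===== PRECONDITION & SPEC =====
-- Pre_ excludes (a) assets whose dict lacks sort_field, on which A raises KeyError, and
-- (b) association lists with duplicate keys (outer asset ids or inner field names), which do not
-- correspond to a unique Python dict (last value wins), so behaviour there is representation-dependent.
def Pre_asset_sorter (assets_to_sort : List (String × List (String × String))) (sort_by_list : List String) (sort_field : String) : Prop :=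
  (assets_to_sort.map Prod.fst).Nodup ∧
  ∀ p ∈ assets_to_sort, (p.2.map Prod.fst).Nodup ∧ sort_field ∈ p.2.map Prod.fst
instance (assets_to_sort : List (String × List (String × String))) (sort_by_list : List String) (sort_field : String) : Decidable (Pre_asset_sorter assets_to_sort sort_by_list sort_field) := by unfold Pre_asset_sorter; infer_instance

def pvWitness_asset_sorter : (List (String × List (String × String))) × List String × String :=
  ([("a1", [("cat", "x"), ("n", "1")]), ("a2", [("cat", "y")])], ["x", "z"], "cat")

def Spec_asset_sorter (assets_to_sort : List (String × List (String × String))) (sort_by_list : List String) (sort_field : String) (out : List (String × List (List (String × String)))) : Prop := out = asset_sorter_alt assets_to_sort sort_by_list sort_field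
instance (assets_to_sort : List (String × List (String × String))) (sort_by_list : List String) (sort_field : String) (out : List (String × List (List (String × String)))) : Decidable (Spec_asset_sorter assets_to_sort sort_by_list sort_field out) := by unfold Spec_asset_sorter; infer_instance

-- ===== CLAIM (what is proved, stated in full; the proofs are below) =====
def Claim_equal_asset_sorter : Prop := ∀ (assets_to_sort : List (String × List (String × String))) (sort_by_list : List String) (sort_field : String), Dom_asset_sorter assets_to_sort sort_by_list sort_field → Pre_asset_sorter assets_to_sort sort_by_list sort_field → Spec_asset_sorter assets_to_sort sort_by_list sort_field (asset_sorter assets_to_sort sort_by_list sort_field)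

-- ===== LEMMAS AND PROOFS =====

-- the field value an asset kv contributes
def pvField (sort_field : String) (kv : String × List (String × String)) : String :=
  (PySem.Dict.mk kv.2).getD sort_field ""

-- the bucket of category c: assets (in list order) whose field value is c
def pvBucket (sort_field : String) (assets : List (String × List (String × String))) (c : String) : List (List (String × String)) :=
  ((assets.map (fun kv => (pvField sort_field kv, kv.2))).filter (fun q => q.1 == c)).map (·.2)

-- phase 1 of A: initializing the categories to []
theorem pvA_init_getD (sbl : List String)
    (d : PySem.Dict String (List (List (String × String)))) (c : String) :
    (sbl.foldl (fun d each => d.insert each ([] : List (List (String × String)))) d).getD c []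
      = if c ∈ sbl then [] else d.getD c [] := by
  induction sbl generalizing d with
  | nil => simp
  | cons c' sbl ih =>
    simp only [List.foldl_cons, ih, PySem.Dict.getD_insert, List.mem_cons]
    split_ifs with h1 h2 h3 h4 <;> simp_all

theorem pvA_init_keys (sbl : List String) :
    (sbl.foldl (fun d each => d.insert each ([] : List (List (String × String)))) PySem.Dict.empty).keys
      = PySem.Set.ofList sbl := by
  rw [PySem.Dict.keys_foldl_insert]
  simp [PySem.Dict.keys_empty, PySem.Set.update_nil_left]

-- one step of A's second loop preserves the key list
theorem pvA_step_keys (sf : String) (kv : String × List (String × String))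
    (d : PySem.Dict String (List (List (String × String)))) :
    ((if d.contains (pvField sf kv) then d.modify (pvField sf kv) [] (fun l => l ++ [kv.2]) else d)).keys = d.keys := by
  split_ifs with h
  · rw [PySem.Dict.keys_modify, PySem.Dict.keys_insert_of_contains d _ h]
  · rfl

-- A's second loop preserves the key list
theorem pvA_loop_keys (sf : String) (assets : List (String × List (String × String)))
    (d : PySem.Dict String (List (List (String × String)))) :
    (assets.foldl (fun d kv =>
        if d.contains (pvField sf kv) then d.modify (pvField sf kv) [] (fun l => l ++ [kv.2]) else d) d).keys
      = d.keys := by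
  induction assets generalizing d with
  | nil => rfl
  | cons kv assets ih =>
    simp only [List.foldl_cons]
    rw [ih, pvA_step_keys]

-- contains is determined by the key list
theorem pv_contains_congr (c : String) (e d : PySem.Dict String (List (List (String × String))))
    (he : e.keys = d.keys) : e.contains c = d.contains c := by
  by_cases h : c ∈ d.keys
  · rw [(PySem.Dict.contains_iff_mem_keys d c).2 h,
      (PySem.Dict.contains_iff_mem_keys e c).2 (he ▸ h)]
  · have h1 : d.contains c = false := by
      cases hv : d.contains c
      · rfl
      · exact absurd ((PySem.Dict.contains_iff_mem_keys d c).1 hv) h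
    have h2 : e.contains c = false := by
      cases hv : e.contains c
      · rfl
      · exact absurd (he ▸ (PySem.Dict.contains_iff_mem_keys e c).1 hv) h
    rw [h1, h2]

-- A's second loop, pointwise: the value at c grows by the bucket of c iff c is a key
theorem pvA_loop_getD (sf : String) (assets : List (String × List (String × String)))
    (d : PySem.Dict String (List (List (String × String)))) (c : String) :
    (assets.foldl (fun d kv =>
        if d.contains (pvField sf kv) then d.modify (pvField sf kv) [] (fun l => l ++ [kv.2]) else d) d).getD c []
      = d.getD c [] ++ (if d.contains c then pvBucket sf assets c else []) := by
  induction assets generalizing d with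
  | nil => simp [pvBucket]
  | cons kv assets ih =>
    simp only [List.foldl_cons, ih]
    rw [pv_contains_congr c _ d (pvA_step_keys sf kv d)]
    have hbucket : pvBucket sf (kv :: assets) c
        = (if pvField sf kv = c then [kv.2] else []) ++ pvBucket sf assets c := by
      simp only [pvBucket, List.map_cons, List.filter_cons]
      split_ifs <;> simp_all
    by_cases h : d.contains (pvField sf kv)
    · rw [if_pos h, PySem.Dict.getD_modify]
      by_cases hc : d.contains c
      · rw [if_pos hc, if_pos hc, hbucket]
        by_cases hv : c = pvField sf kv
        · rw [if_pos hv, if_pos (by rw [hv]), hv, List.append_assoc]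
        · rw [if_neg hv, if_neg (fun h' => hv h'.symm), List.nil_append]
      · rw [if_neg hc, if_neg hc, List.append_nil]
        have hv : c ≠ pvField sf kv := by
          intro h'; rw [h'] at hc; exact hc h
        rw [if_neg hv, List.append_nil]
    · rw [if_neg h]
      by_cases hc : d.contains c
      · rw [if_pos hc, if_pos hc, hbucket]
        have hv : pvField sf kv ≠ c := by
          intro h'; rw [h'] at h; exact h hc
        rw [if_neg hv, List.nil_append]
      · rw [if_neg hc, if_neg hc]

-- B's per-category filter over the values list equals the bucket of that category
theorem pvB_filter_eq_bucket (sf : String) (assets : List (String × List (String × String))) (c : String) :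
    (assets.map (·.2)).filter (fun a => (PySem.Dict.mk a).getD sf "" == c)
      = pvBucket sf assets c := by
  induction assets with
  | nil => rfl
  | cons kv assets ih =>
    simp only [pvBucket, List.map_cons, List.filter_cons] at *
    by_cases h : pvField sf kv = c
    · rw [if_pos (by simpa [pvField] using h), if_pos (by simpa using h)]
      simp [ih]
    · rw [if_neg (by simpa [pvField] using h), if_neg (by simpa using h)]
      exact ih

-- B's comprehension loop, pointwise
theorem pvB_proj_getD (G : String → List (List (String × String))) (sbl : List String)
    (r : PySem.Dict String (List (List (String × String)))) (c : String) :
    (sbl.foldl (fun r cat => r.insert cat (G cat)) r).getD c []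
      = if c ∈ sbl then G c else r.getD c [] := by
  induction sbl generalizing r with
  | nil => simp
  | cons c' sbl ih =>
    simp only [List.foldl_cons, ih, PySem.Dict.getD_insert, List.mem_cons]
    split_ifs with h1 h2 h3 h4 <;> simp_all

-- B's comprehension loop keys
theorem pvB_proj_keys (G : String → List (List (String × String))) (sbl : List String) :
    (sbl.foldl (fun r cat => r.insert cat (G cat)) PySem.Dict.empty).keys
      = PySem.Set.ofList sbl := by
  rw [PySem.Dict.keys_foldl_insert]
  simp [PySem.Dict.keys_empty, PySem.Set.update_nil_left]

-- ===== VERDICT (by name: the statement is the Claim_ definition above) =====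
theorem asset_sorter_spec : Claim_equal_asset_sorter := by
  intro assets sbl sf _ _
  unfold Spec_asset_sorter asset_sorter asset_sorter_alt
  simp only []
  set dA := assets.foldl (fun d kv =>
      let v := (PySem.Dict.mk kv.2).getD sf ""
      if d.contains v then d.modify v [] (fun l => l ++ [kv.2]) else d)
    (sbl.foldl (fun d each => d.insert each []) PySem.Dict.empty) with hdA
  set dB := sbl.foldl (fun r cat =>
      r.insert cat ((assets.map (·.2)).filter (fun a => (PySem.Dict.mk a).getD sf "" == cat)))
    PySem.Dict.empty with hdB
  have hkA : dA.keys = PySem.Set.ofList sbl := by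
    rw [hdA]
    rw [show (fun (d : PySem.Dict String (List (List (String × String)))) kv =>
      let v := (PySem.Dict.mk kv.2).getD sf ""
      if d.contains v then d.modify v [] (fun l => l ++ [kv.2]) else d)
      = (fun d kv => if d.contains (pvField sf kv) then d.modify (pvField sf kv) [] (fun l => l ++ [kv.2]) else d) from rfl]
    rw [pvA_loop_keys, pvA_init_keys]
  have hkB : dB.keys = PySem.Set.ofList sbl := by
    rw [hdB, pvB_proj_keys]
  have hndA : dA.keys.Nodup := by rw [hkA]; exact PySem.Set.nodup_ofList sbl
  have hndB : dB.keys.Nodup := by rw [hkB]; exact PySem.Set.nodup_ofList sbl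
  have hA := PySem.Dict.items_eq_map_keys dA hndA []
  have hB := PySem.Dict.items_eq_map_keys dB hndB []
  rw [hA, hB, hkA, hkB]
  apply List.map_congr_left
  intro c hc
  have hcs : c ∈ sbl := (PySem.Set.mem_ofList sbl c).1 hc
  have hAv : dA.getD c [] = pvBucket sf assets c := by
    rw [hdA]
    rw [show (fun (d : PySem.Dict String (List (List (String × String)))) kv =>
      let v := (PySem.Dict.mk kv.2).getD sf ""
      if d.contains v then d.modify v [] (fun l => l ++ [kv.2]) else d)
      = (fun d kv => if d.contains (pvField sf kv) then d.modify (pvField sf kv) [] (fun l => l ++ [kv.2]) else d) from rfl]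
    rw [pvA_loop_getD]
    have hcont : (sbl.foldl (fun d each => d.insert each ([] : List (List (String × String)))) PySem.Dict.empty).contains c = true := by
      apply (PySem.Dict.contains_iff_mem_keys _ _).2
      rw [pvA_init_keys]
      exact (PySem.Set.mem_ofList sbl c).2 hcs
    rw [hcont, if_pos rfl, pvA_init_getD]
    simp [hcs]
  have hBv : dB.getD c [] = pvBucket sf assets c := by
    rw [hdB, pvB_proj_getD, if_pos hcs]
    exact pvB_filter_eq_bucket sf assets c
  rw [hAv, hBv]
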